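-- pv_equiv track=rewrite | github.com/omeravrech/DevSecOps12 | SentenceGuessGame/functions.py | index_char_in_sentence
-- ===== SOURCE A (Python) =====
-- def is_sentence(sentence: list | None = None) -> bool:
--     """ Verify if the list is a valid sentences who build from words """
--     if type(sentence) != list:
--         return False
--
--     for word in sentence:
--         if type(word) != str:
--             return False
--
--     s = " ".join(sentence)
--     for char in s:
--         if char.isdigit():
--             return False
--
--     return True
--
-- def is_char(char: str | None = None) -> bool:
--     """ Validate that given string is 1 alphanumeric character """
--     return type(char) == str and len(char) == 1 and char.isalpha()
--
-- def index_char_in_sentence(sentence: list | None = None, char: str | None = None) -> list | None: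
--     """ This function responsible for find the indexes of given char in a given sentence """
--     if not is_sentence(sentence) or not is_char(char):
--         return None
--
--     indexes = []
--     s = " ".join(sentence)
--     for index, _char in enumerate(s):
--         if _char.lower() == char.lower():
--             indexes.append(index)
--     return indexes
-- ===== SOURCE B (Python) =====
-- def is_sentence(sentence: list | None = None) -> bool:
--     """ Verify if the list is a valid sentence built from words """
--     if not isinstance(sentence, list):
--         return False
--     if not all(isinstance(w, str) for w in sentence):
--         return False
--     return not any(ch.isdigit() for ch in " ".join(sentence))
--
-- def is_char(char: str | None = None) -> bool:
--     """ Validate that given string is 1 alphabetic character """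
--     return isinstance(char, str) and len(char) == 1 and char.isalpha()
--
-- def index_char_in_sentence(sentence: list | None = None, char: str | None = None) -> list | None:
--     """ Find the indexes of the given char in the sentence by repeated str.find """
--     if not is_sentence(sentence) or not is_char(char):
--         return None
--
--     s = " ".join(sentence).lower()
--     c = char.lower()
--     indexes = []
--     start = 0
--     while True:
--         pos = s.find(c, start)
--         if pos == -1:
--             break
--         indexes.append(pos)
--         start = pos + 1
--     return indexes
-- ===== Notes on version B (the rewrite author's own statement) =====
-- stated objective: alternative
-- what changed: Lowercases the joined sentence and the char once, then locates matches by a repeated str.find loop (start = pos + 1) instead of enumerating every character and comparing per-character lowercased values.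
import Mathlib
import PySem

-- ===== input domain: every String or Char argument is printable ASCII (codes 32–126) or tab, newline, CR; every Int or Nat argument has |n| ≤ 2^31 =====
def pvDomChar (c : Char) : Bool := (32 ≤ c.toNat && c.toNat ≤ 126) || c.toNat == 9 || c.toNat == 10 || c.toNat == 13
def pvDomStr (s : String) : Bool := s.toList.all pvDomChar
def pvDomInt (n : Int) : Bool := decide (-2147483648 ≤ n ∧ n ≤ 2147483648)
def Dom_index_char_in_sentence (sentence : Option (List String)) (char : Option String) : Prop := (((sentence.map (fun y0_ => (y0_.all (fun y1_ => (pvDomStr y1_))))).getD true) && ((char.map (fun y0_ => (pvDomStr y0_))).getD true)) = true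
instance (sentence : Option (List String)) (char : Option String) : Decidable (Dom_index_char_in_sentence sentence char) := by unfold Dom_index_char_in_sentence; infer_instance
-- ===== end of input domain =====

-- B lowercases the joined sentence and the char once and collects match positions with a
-- repeated find loop (start = pos + 1) instead of A's per-character lowercase-and-compare
-- scan; same return value on every input (objective: alternative).

-- ===== PORT A =====

def is_sentence_A (sentence : Option (List String)) : Bool :=
  match sentence with
  | none => false        -- type(sentence) != list
  | some ws =>
      -- 'for word in sentence: if type(word) != str: return False' cannot fire: elements are str by type
      let s := PySem.Chars.join [' '] (ws.map String.toList)
      if s.any (fun c => PySem.Chars.isdigit c) then false else true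

def is_char_A (char : Option String) : Bool :=
  match char with
  | none => false        -- type(char) == str fails
  | some c => (c.toList.length == 1) && PySem.Chars.strIsalpha c.toList

def index_char_in_sentence (sentence : Option (List String)) (char : Option String) : Option (List Int) :=
  if !is_sentence_A sentence || !is_char_A char then none
  else
    let s := PySem.Chars.join [' '] ((sentence.getD []).map String.toList)
    let c := (char.getD "").toList
    some ((PySem.List.enumerate s).foldl
      (fun acc p => if PySem.Chars.lower [p.2] == PySem.Chars.lower c then acc ++ [p.1] else acc) [])

-- ===== PORT B =====

def is_sentence_B (sentence : Option (List String)) : Bool :=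
  match sentence with
  | none => false
  | some ws => !(PySem.Chars.join [' '] (ws.map String.toList)).any (fun ch => PySem.Chars.isdigit ch)

def is_char_B (char : Option String) : Bool :=
  match char with
  | none => false
  | some c => (c.toList.length == 1) && c.toList.all (fun ch => PySem.Chars.isalpha ch)

-- termination fact for the find loop (cited by name in decreasing_by)
theorem findFrom_neg_of_gt' (s sub : List Char) (start : Nat) (h : s.length < start) :
    PySem.Chars.findFrom s sub (start : Int) = -1 := by
  simp only [PySem.Chars.findFrom]
  split_ifs <;> omega

theorem findFrom_facts (s sub : List Char) (start : Nat)
    (h : PySem.Chars.findFrom s sub (start : Int) ≠ -1) :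
    start ≤ s.length ∧ (start : Int) ≤ PySem.Chars.findFrom s sub (start : Int) := by
  by_cases hle : start ≤ s.length
  · refine ⟨hle, ?_⟩
    rw [PySem.Chars.findFrom_natCast s sub start hle] at h ⊢
    by_cases hr : PySem.Chars.find (List.drop start s) sub = -1
    · simp [hr] at h
    · have hge := PySem.Chars.neg_one_le_find (List.drop start s) sub
      rw [if_neg hr]
      omega
  · exact absurd (findFrom_neg_of_gt' s sub start (by omega)) h

-- the 'while True: pos = s.find(c, start); …' loop of Source B
def findLoop (s c : List Char) (start : Nat) (acc : List Int) : List Int :=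
  -- pos = s.find(c, start) is inlined at its three use sites
  if _h : PySem.Chars.findFrom s c (start : Int) = -1 then acc
  else findLoop s c ((PySem.Chars.findFrom s c (start : Int)).toNat + 1)
         (acc ++ [PySem.Chars.findFrom s c (start : Int)])
termination_by s.length + 1 - start
decreasing_by
  have hf := findFrom_facts s c start _h
  omega

def index_char_in_sentence_alt (sentence : Option (List String)) (char : Option String) : Option (List Int) :=
  if !is_sentence_B sentence || !is_char_B char then none
  else
    let s := PySem.Chars.lower (PySem.Chars.join [' '] ((sentence.getD []).map String.toList))
    let c := PySem.Chars.lower (char.getD "").toList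
    some (findLoop s c 0 [])

-- ===== PRECONDITION & SPEC =====
def Spec_index_char_in_sentence (sentence : Option (List String)) (char : Option String) (out : Option (List Int)) : Prop := out = index_char_in_sentence_alt sentence char
instance (sentence : Option (List String)) (char : Option String) (out : Option (List Int)) : Decidable (Spec_index_char_in_sentence sentence char out) := by unfold Spec_index_char_in_sentence; infer_instance

-- ===== CLAIM (what is proved, stated in full; the proofs are below) =====
def Claim_equal_index_char_in_sentence : Prop := ∀ (sentence : Option (List String)) (char : Option String), Dom_index_char_in_sentence sentence char → Spec_index_char_in_sentence sentence char (index_char_in_sentence sentence char)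

-- ===== LEMMAS AND PROOFS =====

-- occurrence indices of the characters of u satisfying p
def occ (p : Char → Bool) : List Char → List Nat
  | [] => []
  | x :: xs => if p x then 0 :: (occ p xs).map (· + 1) else (occ p xs).map (· + 1)

theorem occ_map (p : Char → Bool) (f : Char → Char) (u : List Char) :
    occ p (u.map f) = occ (fun x => p (f x)) u := by
  induction u with
  | nil => rfl
  | cons x xs ih => simp [occ, ih]

theorem occ_congr {p q : Char → Bool} (h : ∀ x, p x = q x) (u : List Char) :
    occ p u = occ q u := by
  induction u with
  | nil => rfl
  | cons x xs ih => simp [occ, h, ih]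

theorem occ_eq_nil_of_not_mem {d : Char} {u : List Char} (h : d ∉ u) :
    occ (fun x => x == d) u = [] := by
  induction u with
  | nil => rfl
  | cons x xs ih =>
      simp only [List.mem_cons, not_or] at h
      simp [occ, ih h.2, (by simpa using (Ne.symm h.1) : (x == d) = false)]

theorem occ_first {d : Char} : ∀ (u : List Char) (m : Nat),
    (∀ i, i < m → u[i]? ≠ some d) → u[m]? = some d →
    occ (fun x => x == d) u = m :: (occ (fun x => x == d) (u.drop (m + 1))).map (· + (m + 1)) := by
  intro u
  induction u with
  | nil => intro m _ hm; simp at hm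
  | cons x xs ih =>
      intro m hlt hm
      cases m with
      | zero =>
          simp only [List.getElem?_cons_zero, Option.some.injEq] at hm
          simp [occ, hm]
      | succ m' =>
          have hx : ¬ (x = d) := by
            have h0 := hlt 0 (Nat.succ_pos _)
            simpa using h0
          have ih' := ih m' (fun i hi => by
              have := hlt (i + 1) (by omega)
              simpa using this)
            (by simpa using hm)
          have hxf : (x == d) = false := by simpa using hx
          simp only [occ, hxf, Bool.false_eq_true, if_false, ih', List.map_cons,
            List.map_map, List.drop_succ_cons]
          congr 1

theorem singleton_prefix_iff (d : Char) (v : List Char) : [d] <+: v ↔ v.head? = some d := by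
  cases v with
  | nil => simp
  | cons x xs => constructor
                 · intro h
                   rcases List.cons_prefix_cons.mp h with ⟨h1, _⟩
                   simp [h1]
                 · intro h
                   simp only [List.head?_cons, Option.some.injEq] at h
                   exact List.cons_prefix_cons.mpr ⟨h.symm, List.nil_prefix⟩

theorem singleton_infix_iff (d : Char) (v : List Char) : [d] <:+: v ↔ d ∈ v := by
  constructor
  · rintro ⟨s, t, rfl⟩; simp
  · intro h
    rcases List.append_of_mem h with ⟨s, t, rfl⟩
    exact ⟨s, t, by simp⟩

theorem beq_singleton (a b : Char) : ([a] == [b]) = (a == b) := by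
  cases h : a == b
  · simp_all
  · simp_all

-- A's loop: fold over enumerate = occ indices shifted by the start value
theorem foldl_enum_occ (p : Char → Bool) : ∀ (u : List Char) (i : Int) (acc : List Int),
    (PySem.List.enumerate u i).foldl
      (fun acc q => if p q.2 then acc ++ [q.1] else acc) acc
    = acc ++ (occ p u).map (fun (k : Nat) => i + (k : Int)) := by
  intro u
  induction u with
  | nil => intro i acc; simp [PySem.List.enumerate_nil, occ]
  | cons x xs ih =>
      intro i acc
      rw [PySem.List.enumerate_cons]
      simp only [List.foldl_cons]
      have e1 : ((fun k : Nat => i + (k : Int)) ∘ (fun x : Nat => x + 1))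
          = (fun k : Nat => i + 1 + (k : Int)) :=
        funext (fun k => by simp only [Function.comp_apply]; push_cast; ring)
      by_cases hp : p x = true
      · rw [if_pos hp, ih]
        simp only [occ, hp, if_true, List.map_cons, List.map_map, e1, Nat.cast_zero, add_zero,
          List.append_assoc, List.singleton_append]
      · have hpf : p x = false := by simpa using hp
        rw [if_neg hp, ih]
        simp only [occ, hpf, Bool.false_eq_true, if_false, List.map_map, e1]

-- B's loop: findLoop collects occ indices of the tail from 'start'
theorem findLoop_eq (t : List Char) (d : Char) : ∀ (n start : Nat) (acc : List Int),
    t.length + 1 - start ≤ n →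
    findLoop t [d] start acc
      = acc ++ (occ (fun x => x == d) (t.drop start)).map (fun k => ((start + k : Nat) : Int)) := by
  intro n
  induction n with
  | zero =>
      intro start acc hfuel
      have hgt : t.length < start := by omega
      rw [findLoop, dif_pos (by simpa using findFrom_neg_of_gt' t [d] start hgt)]
      rw [List.drop_eq_nil_of_le (by omega)]
      simp [occ]
  | succ n' ih =>
      intro start acc hfuel
      rw [findLoop]
      by_cases hpos : PySem.Chars.findFrom t [d] (start : Int) = -1
      · rw [dif_pos hpos]
        by_cases hle : start ≤ t.length
        · have hinf : ¬ [d] <:+: t.drop start :=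
            (PySem.Chars.findFrom_natCast_eq_neg_one_iff t [d] start hle).mp hpos
          have hmem : d ∉ t.drop start := fun hm => hinf ((singleton_infix_iff d _).mpr hm)
          rw [occ_eq_nil_of_not_mem hmem]
          simp
        · rw [List.drop_eq_nil_of_le (by omega)]
          simp [occ]
      · rw [dif_neg hpos]
        have hle : start ≤ t.length := by
          by_contra hgt
          exact hpos (findFrom_neg_of_gt' t [d] start (by omega))
        rw [PySem.Chars.findFrom_natCast t [d] start hle] at hpos ⊢
        by_cases hr : PySem.Chars.find (List.drop start t) [d] = -1
        · simp [hr] at hpos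
        · rw [if_neg hr] at hpos
          rw [if_neg hr]
          have hge := PySem.Chars.neg_one_le_find (List.drop start t) [d]
          have hr0 : 0 ≤ PySem.Chars.find (List.drop start t) [d] := by omega
          obtain ⟨hpre, hfirst⟩ := PySem.Chars.find_spec (s := List.drop start t) (sub := [d]) hr0
          set r : Nat := (PySem.Chars.find (List.drop start t) [d]).toNat with hrdef
          have hm : (List.drop start t)[r]? = some d := by
            have := (singleton_prefix_iff d _).mp hpre
            rwa [List.head?_drop] at this
          have hno : ∀ i, i < r → (List.drop start t)[i]? ≠ some d := by
            intro i hi hsome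
            exact hfirst i hi ((singleton_prefix_iff d _).mpr (by rwa [List.head?_drop]))
          rw [occ_first (List.drop start t) r hno hm]
          have hdd : (List.drop start t).drop (r + 1) = List.drop (start + r + 1) t := by
            rw [List.drop_drop]; ring_nf
          have htn : (↑start + PySem.Chars.find (List.drop start t) [d]).toNat = start + r := by
            omega
          have hfind : PySem.Chars.find (List.drop start t) [d] = (r : Int) := by omega
          rw [htn, ih (start + r + 1) (acc ++ [↑start + PySem.Chars.find (List.drop start t) [d]])
              (by
                have hlen : r ≤ (List.drop start t).length := by
                  have := PySem.Chars.find_le_length (List.drop start t) [d]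
                  omega
                simp only [List.length_drop] at hlen
                omega)]
          rw [← hdd]
          simp only [List.map_cons, List.map_map, List.append_assoc, List.singleton_append]
          congr 1
          congr 1
          · omega
          · exact List.map_congr_left (fun a _ => by simp only [Function.comp_apply]; omega)

theorem guard_sentence (sentence : Option (List String)) : is_sentence_A sentence = is_sentence_B sentence := by
  cases sentence with
  | none => rfl
  | some ws =>
      simp only [is_sentence_A, is_sentence_B]
      cases h : (PySem.Chars.join [' '] (ws.map String.toList)).any (fun c => PySem.Chars.isdigit c) <;> simp [h]

theorem guard_char (char : Option String) : is_char_A char = is_char_B char := by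
  cases char with
  | none => rfl
  | some c =>
      simp only [is_char_A, is_char_B, PySem.Chars.strIsalpha]
      cases cl : c.toList with
      | nil => simp
      | cons x xs => simp

-- ===== VERDICT (by name: the statement is the Claim_ definition above) =====
theorem lower_toList (u : List Char) : PySem.Chars.lower u = u.map PySem.Chars.lowerChar := rfl

theorem index_char_in_sentence_spec : Claim_equal_index_char_in_sentence := by
  intro sentence char _
  simp only [Spec_index_char_in_sentence, index_char_in_sentence, index_char_in_sentence_alt]
  rw [guard_sentence, guard_char]
  by_cases hg : (!is_sentence_B sentence || !is_char_B char) = true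
  · rw [if_pos hg, if_pos hg]
  · rw [if_neg hg, if_neg hg]
    simp only [Bool.or_eq_true, Bool.not_eq_true', not_or, Bool.not_eq_false] at hg
    obtain ⟨hs, hc⟩ := hg
    cases char with
    | none => simp [is_char_B] at hc
    | some c =>
        simp only [is_char_B, Bool.and_eq_true, beq_iff_eq] at hc
        obtain ⟨hlen, -⟩ := hc
        obtain ⟨c0, hc0⟩ : ∃ c0, c.toList = [c0] := by
          cases hcl : c.toList with
          | nil => rw [hcl] at hlen; simp at hlen
          | cons y ys =>
              rw [hcl] at hlen
              cases ys with
              | nil => exact ⟨y, rfl⟩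
              | cons z zs => simp at hlen
        simp only [Option.getD_some]
        simp only [hc0]
        set s := PySem.Chars.join [' '] ((sentence.getD []).map String.toList) with hsdef
        have hlc : PySem.Chars.lower [c0] = [PySem.Chars.lowerChar c0] := by
          rw [lower_toList]; simp
        rw [foldl_enum_occ (fun x => PySem.Chars.lower [x] == PySem.Chars.lower [c0]) s 0 []]
        conv_rhs => rw [hlc]
        rw [findLoop_eq (PySem.Chars.lower s) (PySem.Chars.lowerChar c0)
              ((PySem.Chars.lower s).length + 1) 0 [] (by omega)]
        simp only [List.nil_append, List.drop_zero]
        have hQ : occ (fun x => x == PySem.Chars.lowerChar c0) (PySem.Chars.lower s)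
            = occ (fun x => PySem.Chars.lower [x] == PySem.Chars.lower [c0]) s := by
          rw [lower_toList, occ_map]
          refine occ_congr (fun x => ?_) s
          rw [lower_toList, lower_toList]
          simp only [List.map_cons, List.map_nil]
          exact (beq_singleton _ _).symm
        rw [hQ]
        simp only [Option.some.injEq]
        exact List.map_congr_left (fun a _ => by simp)
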